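-- pv_equiv track=rewrite | github.com/anaumghori/strata | strata/models/lfm/config.py | _infer_layer_types
-- ===== SOURCE A (Python) =====
-- def _infer_layer_types(cfg: dict, num_hidden_layers: int) -> list[str]:
--     """Infer layer types from full_attn_idxs when layer_types is not provided.
--
--     :param cfg: Raw config dictionary
--     :param num_hidden_layers: Number of layers in the model
--     :returns: List of layer type strings
--     """
--     full_attn_idxs = cfg.get("full_attn_idxs")
--     if full_attn_idxs is None:
--         raise ValueError(
--             "Cannot determine layer types: config.json must contain "
--             "'layer_types' or 'full_attn_idxs' field."
--         )
--
--     attn_set = set(full_attn_idxs)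
--     return [
--         "full_attention" if i in attn_set else "short_conv"
--         for i in range(num_hidden_layers)
--     ]
-- ===== SOURCE B (Python) =====
-- def _infer_layer_types(cfg: dict, num_hidden_layers: int) -> list[str]:
--     full_attn_idxs = cfg.get("full_attn_idxs")
--     if full_attn_idxs is None:
--         raise ValueError(
--             "Cannot determine layer types: config.json must contain "
--             "'layer_types' or 'full_attn_idxs' field."
--         )
--     result = ["short_conv"] * num_hidden_layers
--     for idx in full_attn_idxs:
--         if 0 <= idx < num_hidden_layers:
--             result[idx] = "full_attention"
--     return result
-- ===== Notes on version B (the rewrite author's own statement) =====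
-- stated objective: alternative
-- what changed: Instead of scanning every layer index and testing membership in a set of the attention indices, B allocates the whole result as 'short_conv' once and scatters 'full_attention' by looping over the attention indices only.
import Mathlib
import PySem

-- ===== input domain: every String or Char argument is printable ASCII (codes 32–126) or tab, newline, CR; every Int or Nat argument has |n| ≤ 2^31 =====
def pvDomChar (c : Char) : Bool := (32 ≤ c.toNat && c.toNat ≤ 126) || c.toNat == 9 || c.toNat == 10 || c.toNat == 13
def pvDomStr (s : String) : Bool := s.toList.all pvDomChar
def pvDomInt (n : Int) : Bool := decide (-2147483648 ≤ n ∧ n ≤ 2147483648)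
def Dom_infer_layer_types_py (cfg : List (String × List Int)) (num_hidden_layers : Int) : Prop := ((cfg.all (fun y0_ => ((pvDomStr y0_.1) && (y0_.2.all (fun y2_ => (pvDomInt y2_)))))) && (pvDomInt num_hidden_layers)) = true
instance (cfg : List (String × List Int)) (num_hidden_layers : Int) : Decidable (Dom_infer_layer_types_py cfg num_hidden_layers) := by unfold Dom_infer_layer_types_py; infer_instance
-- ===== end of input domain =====

-- B builds the result as ["short_conv"] * n once and scatters "full_attention" over the
-- in-range attention indices, instead of A's scan of range(n) with a set-membership test.

-- ===== PORT A =====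
def infer_layer_types_py (cfg : List (String × List Int)) (num_hidden_layers : Int) : List String :=
  match (PySem.Dict.mk cfg).get? "full_attn_idxs" with
  | none => []  -- Python raises ValueError here; excluded by Pre_
  | some full_attn_idxs =>
      let attn_set : PySem.Set Int := PySem.Set.ofList full_attn_idxs
      (PySem.List.pyRange 0 num_hidden_layers 1).map
        (fun i => if i ∈ attn_set then "full_attention" else "short_conv")

-- ===== PORT B =====
-- the 'for idx in full_attn_idxs' scatter loop of Source B
def iltScatter (n : Int) : List Int → List String → List String
  | [], result => result
  | idx :: rest, result =>
      iltScatter n rest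
        (if 0 ≤ idx ∧ idx < n then result.set idx.toNat "full_attention" else result)

def infer_layer_types_py_alt (cfg : List (String × List Int)) (num_hidden_layers : Int) : List String :=
  match (PySem.Dict.mk cfg).get? "full_attn_idxs" with
  | none => []  -- Python raises ValueError here; excluded by Pre_
  | some full_attn_idxs =>
      iltScatter num_hidden_layers full_attn_idxs
        (List.replicate num_hidden_layers.toNat "short_conv")

-- ===== PRECONDITION & SPEC =====
-- Both A and B raise ValueError when "full_attn_idxs" is absent; Pre_ excludes exactly that.
def Pre_infer_layer_types_py (cfg : List (String × List Int)) (num_hidden_layers : Int) : Prop :=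
  (PySem.Dict.mk cfg).contains "full_attn_idxs" = true
instance (cfg : List (String × List Int)) (num_hidden_layers : Int) : Decidable (Pre_infer_layer_types_py cfg num_hidden_layers) := by unfold Pre_infer_layer_types_py; infer_instance

def pvWitness_infer_layer_types_py : (List (String × List Int)) × Int := ([("full_attn_idxs", [1, 3])], 5)

def Spec_infer_layer_types_py (cfg : List (String × List Int)) (num_hidden_layers : Int) (out : List String) : Prop := out = infer_layer_types_py_alt cfg num_hidden_layers
instance (cfg : List (String × List Int)) (num_hidden_layers : Int) (out : List String) : Decidable (Spec_infer_layer_types_py cfg num_hidden_layers out) := by unfold Spec_infer_layer_types_py; infer_instance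

-- ===== CLAIM (what is proved, stated in full; the proofs are below) =====
def Claim_equal_infer_layer_types_py : Prop := ∀ (cfg : List (String × List Int)) (num_hidden_layers : Int), Dom_infer_layer_types_py cfg num_hidden_layers → Pre_infer_layer_types_py cfg num_hidden_layers → Spec_infer_layer_types_py cfg num_hidden_layers (infer_layer_types_py cfg num_hidden_layers)

-- ===== LEMMAS AND PROOFS =====

lemma iltScatter_length (n : Int) (idxs : List Int) (res : List String) :
    (iltScatter n idxs res).length = res.length := by
  induction idxs generalizing res with
  | nil => rfl
  | cons idx rest ih => rw [iltScatter, ih]; split <;> simp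

lemma iltScatter_getElem? (n : Int) (idxs : List Int) (res : List String)
    (h : res.length = n.toNat) (j : Nat) (hj : j < n.toNat) :
    (iltScatter n idxs res)[j]? =
      if (j : Int) ∈ idxs then some "full_attention" else res[j]? := by
  induction idxs generalizing res with
  | nil => simp [iltScatter]
  | cons idx rest ih =>
    rw [iltScatter]
    set res' := if 0 ≤ idx ∧ idx < n then res.set idx.toNat "full_attention" else res with hres'
    have hlen : res'.length = n.toNat := by rw [hres']; split <;> simp [h]
    rw [ih res' hlen]
    by_cases hm : (j : Int) ∈ rest
    · simp [hm]
    · rw [if_neg hm]; simp only [List.mem_cons]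
      by_cases he : idx = (j : Int)
      · have hg : 0 ≤ idx ∧ idx < n := ⟨by omega, by omega⟩
        have hres2 : res' = res.set j "full_attention" := by
          rw [hres', if_pos hg]; congr 1; omega
        rw [hres2, if_pos (Or.inl he.symm)]
        exact List.getElem?_set_self (by omega)
      · have hcond : ¬((j : Int) = idx ∨ (j : Int) ∈ rest) := by
          rintro (hh | hh)
          · exact he hh.symm
          · exact hm hh
        rw [if_neg hcond, hres']
        split
        · next hg => exact List.getElem?_set_ne (by omega)
        · rfl

theorem infer_layer_types_py_spec : Claim_equal_infer_layer_types_py := by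
  intro cfg n _ _
  unfold Spec_infer_layer_types_py infer_layer_types_py infer_layer_types_py_alt
  cases hget : (PySem.Dict.mk cfg).get? "full_attn_idxs" with
  | none => rfl
  | some idxs =>
    show ((PySem.List.pyRange 0 n 1).map
        (fun i => if i ∈ PySem.Set.ofList idxs then "full_attention" else "short_conv")) =
      iltScatter n idxs (List.replicate n.toNat "short_conv")
    apply List.ext_getElem?
    intro j
    have h1 : ((PySem.List.pyRange 0 n 1).map
        (fun i => if i ∈ PySem.Set.ofList idxs then "full_attention" else "short_conv")).length
        = n.toNat := by
      rw [List.length_map, PySem.List.length_pyRange_one]; omega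
    have h2 : (iltScatter n idxs (List.replicate n.toNat "short_conv")).length = n.toNat := by
      rw [iltScatter_length]; simp
    by_cases hj : j < n.toNat
    · rw [iltScatter_getElem? n idxs _ (by simp) j hj]
      have hrange : PySem.List.pyRange 0 n 1 = PySem.List.pyRange 0 (n.toNat : Int) 1 := by
        congr 1; omega
      rw [hrange, PySem.List.getElem?_map_pyRange_zero
        (fun i => if i ∈ PySem.Set.ofList idxs then "full_attention" else "short_conv") n.toNat j hj]
      simp only [PySem.Set.mem_ofList]
      split <;> simp [hj]
    · rw [List.getElem?_eq_none (by omega), List.getElem?_eq_none (by omega)]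

-- ===== VERDICT (by name: the statement is the Claim_ definition above) =====
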